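-- pv_equiv track=rewrite | github.com/RubanOff/VK | Seminar №4/ExtraLetter.py | extra_letter
-- ===== SOURCE A (Python) =====
-- def extra_letter(a, b):
--
--     # Create a dictionary(hash -_-)
--     hash_map_a = {}
--
--
--     # Fill in hash_map_a
--     for char in a:
--         if char in hash_map_a:
--             hash_map_a[char] += 1
--         else:
--             hash_map_a[char] = 1
--
--     # Checking the existence of a letters
--     for char in b:
--         if char in hash_map_a:
--             hash_map_a[char] -= 1
--             if hash_map_a[char] == 0:
--                 del hash_map_a[char]
--         else:
--             return char
--
--
--     return ""
-- ===== SOURCE B (Python) =====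
-- def extra_letter(a, b):
--     # Nested-scan formulation: no frequency table; for each position i in b,
--     # the letter b[i] is "extra" as soon as its cumulative count in b[:i+1]
--     # exceeds its total count in a.
--     for i, c in enumerate(b):
--         if b[:i+1].count(c) > a.count(c):
--             return c
--     return ""
-- ===== Notes on version B (the rewrite author's own statement) =====
-- stated objective: simpler
-- what changed: Drops the frequency dict and its depletion/erase bookkeeping entirely: B scans b with an index and returns b[i] as soon as b[:i+1].count(b[i]) exceeds a.count(b[i]).
import Mathlib
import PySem

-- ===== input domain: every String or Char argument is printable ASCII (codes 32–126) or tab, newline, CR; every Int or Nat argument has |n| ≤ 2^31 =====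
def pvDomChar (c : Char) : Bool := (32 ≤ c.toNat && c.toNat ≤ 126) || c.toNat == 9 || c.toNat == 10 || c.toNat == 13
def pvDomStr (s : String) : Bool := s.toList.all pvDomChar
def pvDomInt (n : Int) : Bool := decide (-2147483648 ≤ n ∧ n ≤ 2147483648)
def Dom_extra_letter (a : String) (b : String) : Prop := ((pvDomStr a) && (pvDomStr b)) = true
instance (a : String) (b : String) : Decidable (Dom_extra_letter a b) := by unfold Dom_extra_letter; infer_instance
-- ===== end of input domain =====

-- B drops A's frequency dict and its depletion/erase bookkeeping: it scans b with an
-- index and compares prefix counts in b against total counts in a (simpler, not faster).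

-- ===== PORT A =====
-- fill hash_map_a from a
def pvFillA (al : List Char) : PySem.Dict Char Int :=
  al.foldl (fun d ch =>
    if d.contains ch then d.insert ch (d.getD ch 0 + 1) else d.insert ch 1)
    PySem.Dict.empty

-- for char in b: decrement / delete-at-zero, or return char
def pvLoopA : List Char → PySem.Dict Char Int → String
  | [], _ => ""
  | c :: rest, d =>
    if d.contains c then
      let d' := d.insert c (d.getD c 0 - 1)
      if d'.getD c 0 = 0 then pvLoopA rest (d'.erase c) else pvLoopA rest d'
    else String.ofList [c]

def extra_letter (a : String) (b : String) : String :=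
  pvLoopA b.toList (pvFillA a.toList)

-- ===== PORT B =====
-- for i, c in enumerate(b): if b[:i+1].count(c) > a.count(c): return c
def pvLoopB (al bl : List Char) : List Char → Nat → String
  | [], _ => ""
  | c :: rest, i =>
    if (bl.take (i + 1)).count c > al.count c then String.ofList [c]
    else pvLoopB al bl rest (i + 1)

def extra_letter_alt (a : String) (b : String) : String :=
  pvLoopB a.toList b.toList b.toList 0

-- ===== PRECONDITION & SPEC =====
def Spec_extra_letter (a : String) (b : String) (out : String) : Prop := out = extra_letter_alt a b
instance (a : String) (b : String) (out : String) : Decidable (Spec_extra_letter a b out) := by unfold Spec_extra_letter; infer_instance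

-- ===== CLAIM (what is proved, stated in full; the proofs are below) =====
def Claim_equal_extra_letter : Prop := ∀ (a : String) (b : String), Dom_extra_letter a b → Spec_extra_letter a b (extra_letter a b)

-- ===== LEMMAS AND PROOFS =====

theorem pv_find_filter_none (t : List (Char × Int)) (k : Char) :
    (t.filter (fun p => !(p.1 == k))).find? (fun p => p.1 == k) = none := by
  rw [List.find?_eq_none]
  intro p hp
  simp only [List.mem_filter] at hp
  simpa using hp.2

theorem pv_find_filter_ne (t : List (Char × Int)) (k x : Char) (h : x ≠ k) :
    (t.filter (fun p => !(p.1 == k))).find? (fun p => p.1 == x) = t.find? (fun p => p.1 == x) := by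
  induction t with
  | nil => rfl
  | cons p t ih =>
    by_cases hk : p.1 = k
    · have hx : (p.1 == x) = false := by
        simp only [beq_eq_false_iff_ne]; exact fun e => h (e ▸ hk)
      have hk2 : (k == x) = false := by simpa using Ne.symm h
      simp [hk, ih, hk2]
    · by_cases hpx : p.1 = x
      · simp [hpx, h]
      · simp [List.filter_cons ,hk, hpx, ih]

theorem pv_get?_erase (d : PySem.Dict Char Int) (k x : Char) :
    (d.erase k).get? x = if x = k then none else d.get? x := by
  obtain ⟨items⟩ := d
  simp only [PySem.Dict.erase, PySem.Dict.get?]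
  by_cases h : x = k
  · subst h; rw [pv_find_filter_none]; simp
  · rw [pv_find_filter_ne _ _ _ h, if_neg h]

theorem pv_contains_erase (d : PySem.Dict Char Int) (k x : Char) :
    (d.erase k).contains x = (decide (x ≠ k) && d.contains x) := by
  rw [PySem.Dict.contains_eq_isSome_get?, PySem.Dict.contains_eq_isSome_get?, pv_get?_erase]
  by_cases h : x = k <;> simp [h]

theorem pv_getD_erase (d : PySem.Dict Char Int) (k x : Char) :
    (d.erase k).getD x 0 = if x = k then 0 else d.getD x 0 := by
  simp only [PySem.Dict.getD, pv_get?_erase]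
  split <;> rfl

theorem pv_fill_eq_counter (al : List Char) : pvFillA al = PySem.Dict.counter al := by
  rw [← PySem.Dict.foldl_insert_getD_add_one_eq_counter]
  unfold pvFillA
  congr 1
  funext d ch
  by_cases h : d.contains ch = true
  · rw [if_pos h]
  · rw [if_neg h]
    have h0 : d.getD ch 0 = 0 := PySem.Dict.getD_of_not_contains d 0 (by simpa using h)
    rw [h0]; norm_num

theorem pv_take_prefix (p : List Char) (c : Char) (rest : List Char) :
    (p ++ c :: rest).take (p.length + 1) = p ++ [c] := by
  have h : p ++ c :: rest = (p ++ [c]) ++ rest := by simp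
  rw [h, List.take_left' (by simp)]

theorem pv_count_app_self (p : List Char) (c : Char) :
    (p ++ [c]).count c = p.count c + 1 := by simp

theorem pv_count_app_ne (p : List Char) (c x : Char) (h : x ≠ c) :
    (p ++ [c]).count x = p.count x := by
  simp [List.count_append, Ne.symm h]

theorem pv_loop_eq (al bl : List Char) :
    ∀ (suf p : List Char) (d : PySem.Dict Char Int),
      bl = p ++ suf →
      (∀ c, d.contains c = decide (p.count c < al.count c)) →
      (∀ c, p.count c < al.count c → d.getD c 0 = (al.count c : Int) - (p.count c : Int)) →
      pvLoopA suf d = pvLoopB al bl suf p.length := by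
  intro suf
  induction suf with
  | nil => intro p d _ _ _; rfl
  | cons ch rest ih =>
    intro p d hb hcont hgetD
    have hpre : (bl.take (p.length + 1)).count ch = p.count ch + 1 := by
      rw [hb, pv_take_prefix, pv_count_app_self]
    by_cases h : p.count ch < al.count ch
    · -- ch still available in the dict: both continue
      have hc : d.contains ch = true := by rw [hcont ch]; simpa using h
      have hB : ¬ (bl.take (p.length + 1)).count ch > al.count ch := by omega
      have hd : d.getD ch 0 = (al.count ch : Int) - (p.count ch : Int) := hgetD ch h
      rw [pvLoopA, pvLoopB, if_neg hB, if_pos hc]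
      have hd'g : (d.insert ch (d.getD ch 0 - 1)).getD ch 0 =
          (al.count ch : Int) - (p.count ch : Int) - 1 := by
        rw [PySem.Dict.getD_insert_self, hd]
      have hlen : (p ++ [ch]).length = p.length + 1 := by simp
      have hb' : bl = (p ++ [ch]) ++ rest := by simpa using hb
      by_cases hz : (d.insert ch (d.getD ch 0 - 1)).getD ch 0 = 0
      · -- depleted: delete the key
        have hzc : al.count ch = p.count ch + 1 := by
          rw [hd'g] at hz; omega
        rw [if_pos hz, ← hlen]
        apply ih (p ++ [ch]) _ hb'
        · intro x
          rw [pv_contains_erase]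
          by_cases hx : x = ch
          · subst hx
            rw [pv_count_app_self]
            simp [hzc]
          · rw [pv_count_app_ne p ch x hx, PySem.Dict.contains_insert]
            have hbx : (x == ch) = false := by simpa using hx
            simp [hx, hbx]
            rw [hcont x]
        · intro x hxlt
          by_cases hx : x = ch
          · subst hx
            rw [pv_count_app_self] at hxlt; omega
          · rw [pv_getD_erase, if_neg hx, PySem.Dict.getD_insert, if_neg hx,
               pv_count_app_ne p ch x hx]
            rw [pv_count_app_ne p ch x hx] at hxlt
            exact hgetD x hxlt
      · -- not depleted: keep the decremented entry
        have hlt : p.count ch + 1 < al.count ch := by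
          rw [hd'g] at hz; omega
        rw [if_neg hz, ← hlen]
        apply ih (p ++ [ch]) _ hb'
        · intro x
          rw [PySem.Dict.contains_insert]
          by_cases hx : x = ch
          · subst hx
            rw [pv_count_app_self]
            simp [hlt]
          · have hbx : (x == ch) = false := by simpa using hx
            rw [pv_count_app_ne p ch x hx]
            simp [hbx]
            rw [hcont x]
        · intro x hxlt
          rw [PySem.Dict.getD_insert]
          by_cases hx : x = ch
          · subst hx
            rw [if_pos rfl, hd, pv_count_app_self]
            push_cast; ring
          · rw [if_neg hx, pv_count_app_ne p ch x hx]
            rw [pv_count_app_ne p ch x hx] at hxlt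
            exact hgetD x hxlt
    · -- ch exhausted (or absent): both return ch
      have hc : d.contains ch = false := by rw [hcont ch]; simpa using h
      have hB : (bl.take (p.length + 1)).count ch > al.count ch := by omega
      rw [pvLoopA, pvLoopB, if_neg (by simp [hc]), if_pos hB]

-- ===== VERDICT (by name: the statement is the Claim_ definition above) =====
theorem extra_letter_spec : Claim_equal_extra_letter := by
  intro a b _
  unfold Spec_extra_letter extra_letter extra_letter_alt
  rw [pv_fill_eq_counter]
  have h0 : b.toList = ([] : List Char) ++ b.toList := rfl
  have hmain := pv_loop_eq a.toList b.toList b.toList [] (PySem.Dict.counter a.toList) h0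
    (fun c => by rw [PySem.Dict.contains_counter]; simp)
    (fun c hc => by rw [PySem.Dict.getD_counter]; simp)
  simpa using hmain
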